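-- pv_equiv track=rewrite | github.com/Akashnil/bug-engine | bug-engine.py | get_best_val
-- ===== SOURCE A (Python) =====
-- def less_than(val1, val2):
-- 	if val1 == val2:
-- 		return False
-- 	if val1 <= 0 and val2 >= 0:
-- 		return True
-- 	if val1 >= 0 and val2 <= 0:
-- 		return False
-- 	return val1 > val2
--
-- def get_best_val(values, player):
-- 	if len(values) == 0:
-- 		return 1 if player == 1 else -1
-- 	ret = values[0][0]
-- 	for x in values[1:]:
-- 		if (player == 1) != less_than(x[0], ret):
-- 			ret = x[0]
-- 	return ret
-- ===== SOURCE B (Python) =====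
-- def get_best_val(values, player):
--     if len(values) == 0:
--         return 1 if player == 1 else -1
--     vals = [v for v, _ in values]
--     pos = [v for v in vals if v > 0]
--     nonpos = [v for v in vals if v <= 0]
--     if player == 1:
--         if pos:
--             return min(pos)
--         return 0 if 0 in nonpos else min(nonpos)
--     else:
--         if nonpos:
--             neg = [v for v in nonpos if v < 0]
--             return max(neg) if neg else 0
--         return max(pos)
-- ===== Notes on version B (the rewrite author's own statement) =====
-- stated objective: simpler
-- what changed: Replaces the comparator-driven selection loop (custom less_than plus a player-XOR update rule) by a one-pass sign partition of the first components with plain built-in min/max on the positive and nonpositive parts.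
import Mathlib
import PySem

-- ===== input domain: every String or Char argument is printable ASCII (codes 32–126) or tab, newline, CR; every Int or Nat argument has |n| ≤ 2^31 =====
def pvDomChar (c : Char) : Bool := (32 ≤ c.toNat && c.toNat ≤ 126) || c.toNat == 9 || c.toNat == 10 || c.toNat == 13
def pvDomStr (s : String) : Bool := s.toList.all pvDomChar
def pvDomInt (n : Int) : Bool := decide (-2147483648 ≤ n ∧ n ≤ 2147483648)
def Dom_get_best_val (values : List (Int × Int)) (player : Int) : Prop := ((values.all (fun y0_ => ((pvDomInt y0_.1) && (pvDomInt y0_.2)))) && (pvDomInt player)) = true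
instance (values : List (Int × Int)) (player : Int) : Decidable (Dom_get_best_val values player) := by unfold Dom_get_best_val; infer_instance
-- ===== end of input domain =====

-- B replaces A's comparator-driven selection loop by a sign partition with plain min/max (simpler decomposition, same cost).

-- ===== PORT A =====
def less_than (val1 val2 : Int) : Bool :=
  if val1 = val2 then false
  else if val1 ≤ 0 ∧ val2 ≥ 0 then true
  else if val1 ≥ 0 ∧ val2 ≤ 0 then false
  else decide (val1 > val2)

def get_best_val (values : List (Int × Int)) (player : Int) : Int :=
  match values with
  | [] => if player = 1 then 1 else -1
  | v :: rest =>
    rest.foldl (fun ret x => if (decide (player = 1) != less_than x.1 ret) = true then x.1 else ret) v.1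

-- ===== PORT B =====
def get_best_val_alt (values : List (Int × Int)) (player : Int) : Int :=
  match values with
  | [] => if player = 1 then 1 else -1
  | _ :: _ =>
    let vals := values.map Prod.fst
    let pos := vals.filter (fun v => decide (0 < v))
    let nonpos := vals.filter (fun v => decide (v ≤ 0))
    if player = 1 then
      if pos = [] then
        (if (0:Int) ∈ nonpos then 0 else (PySem.List.min? nonpos (fun y => y)).getD 0)
      else (PySem.List.min? pos (fun y => y)).getD 0
    else
      if nonpos = [] then (PySem.List.max? pos (fun y => y)).getD 0
      else
        let neg := nonpos.filter (fun v => decide (v < 0))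
        if neg = [] then 0 else (PySem.List.max? neg (fun y => y)).getD 0

-- ===== PRECONDITION & SPEC =====
def Spec_get_best_val (values : List (Int × Int)) (player : Int) (out : Int) : Prop := out = get_best_val_alt values player
instance (values : List (Int × Int)) (player : Int) (out : Int) : Decidable (Spec_get_best_val values player out) := by unfold Spec_get_best_val; infer_instance

-- ===== CLAIM (what is proved, stated in full; the proofs are below) =====
def Claim_equal_get_best_val : Prop := ∀ (values : List (Int × Int)) (player : Int), Dom_get_best_val values player → Spec_get_best_val values player (get_best_val values player)

-- ===== LEMMAS AND PROOFS =====

-- B's player-1 formula on a plain value list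
def bmax (l : List Int) : Int :=
  let pos := l.filter (fun v => decide (0 < v))
  let nonpos := l.filter (fun v => decide (v ≤ 0))
  if pos = [] then
    (if (0:Int) ∈ nonpos then 0 else (PySem.List.min? nonpos (fun y => y)).getD 0)
  else (PySem.List.min? pos (fun y => y)).getD 0

-- B's other-player formula on a plain value list
def bmin (l : List Int) : Int :=
  let pos := l.filter (fun v => decide (0 < v))
  let nonpos := l.filter (fun v => decide (v ≤ 0))
  if nonpos = [] then (PySem.List.max? pos (fun y => y)).getD 0
  else
    let neg := nonpos.filter (fun v => decide (v < 0))
    if neg = [] then 0 else (PySem.List.max? neg (fun y => y)).getD 0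

lemma bmax_single (a : Int) : bmax [a] = a := by
  rcases lt_trichotomy a 0 with h | h | h
  · simp [bmax, show ¬ (0:Int) < a by omega, show a ≤ 0 by omega,
      PySem.List.min?_id_cons]
  · subst h; simp [bmax]
  · simp [bmax, h, PySem.List.min?_id_cons]

lemma bmin_single (a : Int) : bmin [a] = a := by
  rcases lt_trichotomy a 0 with h | h | h
  · simp [bmin, show ¬ (0:Int) < a by omega, show a ≤ 0 by omega, h,
      PySem.List.max?_id_cons]
  · subst h; simp [bmin]
  · simp [bmin, h, show ¬ a ≤ 0 by omega, PySem.List.max?_id_cons]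

lemma min_cons_cons (a x : Int) (P : List Int) :
    (PySem.List.min? (a :: x :: P) (fun y => y)).getD 0
      = (PySem.List.min? (min a x :: P) (fun y => y)).getD 0 := by
  simp [PySem.List.min?_id_cons, List.foldl]

lemma max_cons_cons (a x : Int) (P : List Int) :
    (PySem.List.max? (a :: x :: P) (fun y => y)).getD 0
      = (PySem.List.max? (max a x :: P) (fun y => y)).getD 0 := by
  simp [PySem.List.max?_id_cons, List.foldl]

lemma bmax_step (a x : Int) (vs : List Int) :
    bmax ((if less_than x a then a else x) :: vs) = bmax (a :: x :: vs) := by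
  by_cases ha : 0 < a <;> by_cases hx : 0 < x
  · -- both positive: winner is min a x
    have hw : (if less_than x a then a else x) = min a x := by
      simp only [less_than]; split_ifs <;> simp_all <;> omega
    rw [hw]
    simp [bmax, List.filter_cons, show (0:Int) < min a x by omega,
      show ¬ min a x ≤ 0 by omega, ha, hx, show ¬ a ≤ 0 by omega,
      show ¬ x ≤ 0 by omega, min_cons_cons]
  · -- a > 0 ≥ x: winner is a
    have hw : (if less_than x a then a else x) = a := by
      simp only [less_than]; split_ifs <;> simp_all <;> omega
    rw [hw]
    simp [bmax, List.filter_cons, ha, show ¬ a ≤ 0 by omega, hx,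
      show x ≤ 0 by omega]
  · -- x > 0 ≥ a: winner is x
    have hw : (if less_than x a then a else x) = x := by
      simp only [less_than]; split_ifs <;> simp_all <;> omega
    rw [hw]
    simp [bmax, List.filter_cons, ha, show a ≤ 0 by omega, hx,
      show ¬ x ≤ 0 by omega]
  · -- both nonpositive
    rcases eq_or_lt_of_le (show a ≤ 0 by omega) with ha0 | ha0
    · -- a = 0: winner is a = 0
      have hw : (if less_than x a then a else x) = a := by
        simp only [less_than]; split_ifs <;> simp_all <;> omega
      rw [hw]; subst ha0
      simp [bmax, List.filter_cons, hx, show x ≤ 0 by omega]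
    · rcases eq_or_lt_of_le (show x ≤ 0 by omega) with hx0 | hx0
      · -- x = 0 > a: winner is x = 0
        have hw : (if less_than x a then a else x) = x := by
          simp only [less_than]; split_ifs <;> simp_all <;> omega
        rw [hw]; subst hx0
        simp [bmax, List.filter_cons, ha, show a ≤ 0 by omega]
      · -- both negative: winner is min a x
        have hw : (if less_than x a then a else x) = min a x := by
          simp only [less_than]; split_ifs <;> simp_all <;> omega
        rw [hw]
        simp [bmax, List.filter_cons, show ¬ (0:Int) < min a x by omega,
          show min a x ≤ 0 by omega, ha, show a ≤ 0 by omega, hx,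
          show x ≤ 0 by omega, show ¬ (0 = a) by omega, show ¬ (0 = x) by omega,
          show ¬ (0 = min a x) by omega, min_cons_cons]

lemma bmin_step (a x : Int) (vs : List Int) :
    bmin ((if less_than x a then x else a) :: vs) = bmin (a :: x :: vs) := by
  by_cases ha : 0 < a <;> by_cases hx : 0 < x
  · -- both positive: winner is max a x
    have hw : (if less_than x a then x else a) = max a x := by
      simp only [less_than]; split_ifs <;> simp_all <;> omega
    rw [hw]
    simp [bmin, List.filter_cons, show (0:Int) < max a x by omega,
      show ¬ max a x ≤ 0 by omega, ha, hx, show ¬ a ≤ 0 by omega,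
      show ¬ x ≤ 0 by omega, max_cons_cons]
  · -- a > 0 ≥ x: winner is x
    have hw : (if less_than x a then x else a) = x := by
      simp only [less_than]; split_ifs <;> simp_all <;> omega
    rw [hw]
    simp [bmin, List.filter_cons, ha, show ¬ a ≤ 0 by omega, hx,
      show x ≤ 0 by omega]
  · -- x > 0 ≥ a: winner is a
    have hw : (if less_than x a then x else a) = a := by
      simp only [less_than]; split_ifs <;> simp_all <;> omega
    rw [hw]
    simp [bmin, List.filter_cons, ha, show a ≤ 0 by omega, hx,
      show ¬ x ≤ 0 by omega]
  · -- both nonpositive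
    rcases eq_or_lt_of_le (show a ≤ 0 by omega) with ha0 | ha0
    · rcases eq_or_lt_of_le (show x ≤ 0 by omega) with hx0 | hx0
      · -- a = x = 0: winner is a = 0
        have hw : (if less_than x a then x else a) = a := by
          simp only [less_than]; split_ifs <;> simp_all <;> omega
        rw [hw]; subst ha0; subst hx0
        simp [bmin, List.filter_cons]
      · -- a = 0 > x: winner is x
        have hw : (if less_than x a then x else a) = x := by
          simp only [less_than]; split_ifs <;> simp_all <;> omega
        rw [hw]; subst ha0
        simp [bmin, List.filter_cons, hx, show x ≤ 0 by omega, hx0]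
    · rcases eq_or_lt_of_le (show x ≤ 0 by omega) with hx0 | hx0
      · -- x = 0 > a: winner is a
        have hw : (if less_than x a then x else a) = a := by
          simp only [less_than]; split_ifs <;> simp_all <;> omega
        rw [hw]; subst hx0
        simp [bmin, List.filter_cons, ha, show a ≤ 0 by omega, ha0]
      · -- both negative: winner is max a x
        have hw : (if less_than x a then x else a) = max a x := by
          simp only [less_than]; split_ifs <;> simp_all <;> omega
        rw [hw]
        simp [bmin, List.filter_cons, show ¬ (0:Int) < max a x by omega,
          show max a x ≤ 0 by omega, show max a x < 0 by omega,
          ha, show a ≤ 0 by omega, ha0, hx, show x ≤ 0 by omega, hx0,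
          max_cons_cons]

lemma foldl_bmax (vs : List Int) : ∀ a : Int,
    vs.foldl (fun ret x => if less_than x ret then ret else x) a = bmax (a :: vs) := by
  induction vs with
  | nil => intro a; simp [List.foldl, bmax_single]
  | cons x vs ih =>
    intro a
    simp only [List.foldl]
    rw [ih (if less_than x a then a else x), bmax_step]

lemma foldl_bmin (vs : List Int) : ∀ a : Int,
    vs.foldl (fun ret x => if less_than x ret then x else ret) a = bmin (a :: vs) := by
  induction vs with
  | nil => intro a; simp [List.foldl, bmin_single]
  | cons x vs ih =>
    intro a
    simp only [List.foldl]
    rw [ih (if less_than x a then x else a), bmin_step]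

-- ===== VERDICT (by name: the statement is the Claim_ definition above) =====
theorem get_best_val_spec : Claim_equal_get_best_val := by
  intro values player _
  unfold Spec_get_best_val
  match values with
  | [] => rfl
  | v :: rest =>
    by_cases hp : player = 1
    · show rest.foldl (fun ret x => if (decide (player = 1) != less_than x.1 ret) = true then x.1 else ret) v.1 = _
      have h1 : ∀ (ret : Int) (x : Int × Int),
          (if (decide (player = 1) != less_than x.1 ret) = true then x.1 else ret)
            = (if less_than x.1 ret then ret else x.1) := by
        intro ret x; simp [hp]; cases less_than x.1 ret <;> simp
      calc rest.foldl (fun ret x => if (decide (player = 1) != less_than x.1 ret) = true then x.1 else ret) v.1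
          = rest.foldl (fun ret x => if less_than x.1 ret then ret else x.1) v.1 := by
              simp only [h1]
        _ = (rest.map Prod.fst).foldl (fun ret x => if less_than x ret then ret else x) v.1 := by
              rw [List.foldl_map]
        _ = bmax (v.1 :: rest.map Prod.fst) := foldl_bmax _ _
        _ = get_best_val_alt (v :: rest) player := by
              simp only [get_best_val_alt, bmax, List.map_cons, hp, if_true]
    · show rest.foldl (fun ret x => if (decide (player = 1) != less_than x.1 ret) = true then x.1 else ret) v.1 = _
      have h1 : ∀ (ret : Int) (x : Int × Int),
          (if (decide (player = 1) != less_than x.1 ret) = true then x.1 else ret)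
            = (if less_than x.1 ret then x.1 else ret) := by
        intro ret x; simp [hp]
      calc rest.foldl (fun ret x => if (decide (player = 1) != less_than x.1 ret) = true then x.1 else ret) v.1
          = rest.foldl (fun ret x => if less_than x.1 ret then x.1 else ret) v.1 := by
              simp only [h1]
        _ = (rest.map Prod.fst).foldl (fun ret x => if less_than x ret then x else ret) v.1 := by
              rw [List.foldl_map]
        _ = bmin (v.1 :: rest.map Prod.fst) := foldl_bmin _ _
        _ = get_best_val_alt (v :: rest) player := by
              simp only [get_best_val_alt, bmin, List.map_cons, hp, if_false]
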